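-- pv_equiv track=rewrite | github.com/thehalleyyoung/a3-python | pyfromscratch/barriers/sparse_sos.py | build_clique_tree
-- ===== SOURCE A (Python) =====
-- from typing import Dict, List, Optional, Tuple, Set, FrozenSet, Iterator, Any, Callable
--
-- def build_clique_tree(cliques: List[Set[int]]) -> Dict[int, int]:
--     """
--     Build clique tree structure.
--
--     For each clique, find its parent (the clique that shares most variables
--     and comes earlier in some ordering).
--     """
--     tree: Dict[int, int] = {}
--
--     for i in range(len(cliques)):
--         best_parent = -1
--         best_overlap = 0
--
--         for j in range(i):
--             overlap = len(cliques[i] & cliques[j])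
--             if overlap > best_overlap:
--                 best_overlap = overlap
--                 best_parent = j
--
--         tree[i] = best_parent
--
--     return tree
-- ===== SOURCE B (Python) =====
-- def build_clique_tree(cliques):
--     """Inverted index variable -> earlier cliques; per clique accumulate
--     overlap counts only for variables shared with earlier cliques."""
--     tree = {}
--     index = {}  # variable -> list of indices of earlier cliques containing it
--     for i, c in enumerate(cliques):
--         cs = set(c)
--         counts = [0] * i
--         for v in cs:
--             for j in index.get(v, []):
--                 counts[j] += 1
--         best_parent = -1
--         best_overlap = 0
--         for j, o in enumerate(counts):
--             if o > best_overlap: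
--                 best_overlap = o
--                 best_parent = j
--         tree[i] = best_parent
--         for v in cs:
--             index[v] = index.get(v, []) + [i]
--     return tree
-- ===== Notes on version B (the rewrite author's own statement) =====
-- stated objective: faster
-- what changed: Replaces A's O(n^2) pairwise set-intersection scan with an incrementally built inverted index (variable -> earlier cliques containing it) and per-clique overlap counters, so overlap work is done only for cliques that actually share variables; the first maximal positive counter gives the same min-index tie-break as A.
import Mathlib
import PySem

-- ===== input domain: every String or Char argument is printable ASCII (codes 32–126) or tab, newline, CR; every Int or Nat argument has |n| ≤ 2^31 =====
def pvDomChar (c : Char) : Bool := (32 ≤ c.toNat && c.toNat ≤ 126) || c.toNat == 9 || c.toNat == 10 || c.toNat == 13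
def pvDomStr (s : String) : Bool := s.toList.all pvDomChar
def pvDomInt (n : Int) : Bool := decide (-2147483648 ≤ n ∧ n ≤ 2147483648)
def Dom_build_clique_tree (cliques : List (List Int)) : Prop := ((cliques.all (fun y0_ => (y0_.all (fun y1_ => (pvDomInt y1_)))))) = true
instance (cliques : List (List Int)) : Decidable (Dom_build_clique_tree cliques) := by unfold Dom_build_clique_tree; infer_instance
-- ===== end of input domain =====

-- B replaces A's pairwise set-intersection scan by an inverted index (variable -> earlier cliques)
-- with per-clique overlap counters; objective: faster (avoids the per-pair set intersection).


-- ===== PORT A =====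
-- for i in range(len(cliques)): scan all j < i, overlap = len(cliques[i] & cliques[j]),
-- keep (best_parent, best_overlap); tree[i] = best_parent
def build_clique_tree (cliques : List (List Int)) : List (Int × Int) :=
  (List.foldl
    (fun (tree : PySem.Dict Int Int) (i : Int) =>
      let st := List.foldl
        (fun (st : Int × Int) (j : Int) =>
          let overlap := PySem.Set.len (PySem.Set.inter
            (PySem.Set.ofList (PySem.List.pyGetD cliques i []))
            (PySem.Set.ofList (PySem.List.pyGetD cliques j [])))
          if overlap > st.2 then (j, overlap) else st)
        (-1, 0) (PySem.List.pyRange 0 i)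
      tree.insert i st.1)
    PySem.Dict.empty (PySem.List.pyRange 0 (PySem.List.len cliques))).items

-- ===== PORT B =====
-- loop body of B: given (tree, index) and (i, c): counts[j] += 1 for each variable v of set(c)
-- and each j in index[v]; first maximal counter > 0 is the parent; then index[v] += [i]
def bctAltStep (st : PySem.Dict Int Int × PySem.Dict Int (List Int))
    (ic : Int × List Int) : PySem.Dict Int Int × PySem.Dict Int (List Int) :=
  let i := ic.1
  let cs : PySem.Set Int := PySem.Set.ofList ic.2
  let counts := List.foldl
    (fun (counts : List Int) (v : Int) =>
      List.foldl
        (fun (counts : List Int) (j : Int) =>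
          PySem.List.pySetD counts j (PySem.List.pyGetD counts j 0 + 1))
        counts (st.2.getD v []))
    (List.replicate i.toNat 0) cs
  let best := List.foldl
    (fun (b : Int × Int) (jo : Int × Int) =>
      if jo.2 > b.2 then (jo.1, jo.2) else b)
    (-1, 0) (PySem.List.enumerate counts)
  (st.1.insert i best.1,
   List.foldl (fun (d : PySem.Dict Int (List Int)) (v : Int) =>
      d.insert v (d.getD v [] ++ [i])) st.2 cs)

def build_clique_tree_alt (cliques : List (List Int)) : List (Int × Int) :=
  (List.foldl bctAltStep (PySem.Dict.empty, PySem.Dict.empty)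
    (PySem.List.enumerate cliques)).1.items

-- ===== PRECONDITION & SPEC =====
def Spec_build_clique_tree (cliques : List (List Int)) (out : List (Int × Int)) : Prop := out = build_clique_tree_alt cliques
instance (cliques : List (List Int)) (out : List (Int × Int)) : Decidable (Spec_build_clique_tree cliques out) := by unfold Spec_build_clique_tree; infer_instance

-- ===== CLAIM (what is proved, stated in full; the proofs are below) =====
def Claim_equal_build_clique_tree : Prop := ∀ (cliques : List (List Int)), Dom_build_clique_tree cliques → Spec_build_clique_tree cliques (build_clique_tree cliques)

-- ===== LEMMAS AND PROOFS =====

-- the overlap A computes between cliques i and j of L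
def pvOv (L : List (List Int)) (i j : Nat) : Int :=
  PySem.Set.len (PySem.Set.inter (PySem.Set.ofList (L.getD i []))
    (PySem.Set.ofList (L.getD j [])))

-- the parent both programs select for clique i
def pvBest (L : List (List Int)) (i : Nat) : Int :=
  (List.foldl
    (fun (st : Int × Int) (j : Nat) =>
      if pvOv L i j > st.2 then ((j : Int), pvOv L i j) else st)
    (-1, 0) (List.range i)).1

lemma pvA_items (L : List (List Int)) :
    build_clique_tree L = (List.range L.length).map (fun (i : Nat) => ((i : Int), pvBest L i)) := by
  have h0 : build_clique_tree L =
    (List.foldl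
      (fun (tree : PySem.Dict Int Int) (i : Int) =>
        tree.insert i
          (List.foldl
            (fun (st : Int × Int) (j : Int) =>
              if PySem.Set.len (PySem.Set.inter
                  (PySem.Set.ofList (PySem.List.pyGetD L i []))
                  (PySem.Set.ofList (PySem.List.pyGetD L j []))) > st.2
              then (j, PySem.Set.len (PySem.Set.inter
                  (PySem.Set.ofList (PySem.List.pyGetD L i []))
                  (PySem.Set.ofList (PySem.List.pyGetD L j []))))
              else st)
            (-1, 0) (PySem.List.pyRange 0 i)).1)
      PySem.Dict.empty (PySem.List.pyRange 0 (PySem.List.len L))).items := rfl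
  rw [h0, PySem.List.len_eq, PySem.List.pyRange_zero_natCast]
  have hfresh := PySem.Dict.items_foldl_insert_fresh
    ((List.range L.length).map (fun k : Nat => (k : Int))) (fun (i : Int) => i)
    (fun (i : Int) =>
      (List.foldl
        (fun (st : Int × Int) (j : Int) =>
          if PySem.Set.len (PySem.Set.inter
              (PySem.Set.ofList (PySem.List.pyGetD L i []))
              (PySem.Set.ofList (PySem.List.pyGetD L j []))) > st.2
          then (j, PySem.Set.len (PySem.Set.inter
              (PySem.Set.ofList (PySem.List.pyGetD L i []))
              (PySem.Set.ofList (PySem.List.pyGetD L j []))))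
          else st)
        (-1, 0) (PySem.List.pyRange 0 i)).1)
    PySem.Dict.empty (by intro a _; simp)
    (by simpa using List.nodup_range.map (f := fun k : Nat => (k : Int)) Nat.cast_injective)
  rw [hfresh]
  simp only [List.map_map]
  refine List.map_congr_left ?_
  intro i hi
  simp only [Function.comp]
  refine Prod.ext rfl ?_
  show (List.foldl _ (-1, 0) (PySem.List.pyRange 0 (i : Int))).1 = pvBest L i
  rw [PySem.List.pyRange_zero_natCast, List.foldl_map]
  unfold pvBest pvOv
  simp only [PySem.List.pyGetD_natCast]

-- counter loop: folding "counts[e] += 1" over E adds count of e to each in-range cell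
lemma pv_incr (E : List Int) : ∀ (c : List Int), (∀ e ∈ E, 0 ≤ e ∧ e < (c.length : Int)) →
    (List.foldl (fun (c : List Int) (e : Int) =>
        PySem.List.pySetD c e (PySem.List.pyGetD c e 0 + 1)) c E).length = c.length ∧
    ∀ j : Nat, j < c.length →
      (List.foldl (fun (c : List Int) (e : Int) =>
        PySem.List.pySetD c e (PySem.List.pyGetD c e 0 + 1)) c E).getD j 0
        = c.getD j 0 + (E.count (j : Int) : Int) := by
  induction E with
  | nil => intro c h; simp
  | cons e E ih =>
    intro c h
    obtain ⟨he0, helt⟩ := h e (by simp)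
    have htn : e.toNat < c.length := by omega
    have hset : PySem.List.pySetD c e (PySem.List.pyGetD c e 0 + 1)
        = c.set e.toNat (PySem.List.pyGetD c e 0 + 1) := PySem.List.pySetD_of_nonneg c _ he0
    simp only [List.foldl_cons]
    have hlen : (PySem.List.pySetD c e (PySem.List.pyGetD c e 0 + 1)).length = c.length := by
      rw [hset, List.length_set]
    obtain ⟨ihl, ihg⟩ := ih _ (by intro e' he'; rw [hlen]; exact h e' (by simp [he']))
    refine ⟨by rw [ihl, hlen], ?_⟩
    intro j hj
    rw [ihg j (by omega)]
    have hget : (PySem.List.pySetD c e (PySem.List.pyGetD c e 0 + 1)).getD j 0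
        = if e.toNat = j then c.getD j 0 + 1 else c.getD j 0 := by
      rw [hset]
      by_cases hc : e.toNat = j
      · subst hc
        simp [List.getD_eq_getElem?_getD, htn,
          PySem.List.pyGetD_eq_getElem c (0 : Int) he0 (by omega)]
      · simp [List.getD_eq_getElem?_getD, hc]
    rw [hget, List.count_cons]
    have : (e == (j : Int)) = decide (e.toNat = j) := by
      by_cases hc : e.toNat = j <;> simp_all <;> omega
    rw [this]
    by_cases hc : e.toNat = j <;> simp [hc] <;> omega

-- occurrences of ↑j in the flattened inverted-index lists = variables shared with clique j
lemma pv_count_flatMap (p : Int → Nat → Bool) (m j : Nat) (hj : j < m) :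
    ∀ (cs : List Int),
      (cs.flatMap (fun v => ((List.range m).filter (p v)).map (fun k : Nat => (k : Int)))).count (j : Int)
        = cs.countP (fun v => p v j) := by
  intro cs
  induction cs with
  | nil => simp
  | cons v cs ih =>
    simp only [List.flatMap_cons, List.count_append, List.countP_cons, ih]
    have hcnt : (((List.range m).filter (p v)).map (fun k : Nat => (k : Int))).count (j : Int)
        = ((List.range m).filter (p v)).count j :=
      List.count_map_of_injective _ (fun k : Nat => (k : Int)) Nat.cast_injective j
    rw [hcnt]
    by_cases hp : p v j
    · rw [List.count_filter hp, List.count_range, if_pos hj, if_pos hp]; omega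
    · rw [if_neg hp]
      have : j ∉ (List.range m).filter (p v) := by
        simp [List.mem_filter, hp]
      rw [List.count_eq_zero.mpr this]; omega

-- appending clique i to the inverted index
lemma pv_idx_update (cs : List Int) (hnd : cs.Nodup) :
    ∀ (d : PySem.Dict Int (List Int)) (i v : Int),
      (cs.foldl (fun (d : PySem.Dict Int (List Int)) (v : Int) =>
          d.insert v (d.getD v [] ++ [i])) d).getD v []
        = d.getD v [] ++ (if v ∈ cs then [i] else []) := by
  induction cs with
  | nil => intro d i v; simp
  | cons x cs ih =>
    intro d i v
    have hx : x ∉ cs := (List.nodup_cons.mp hnd).1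
    simp only [List.foldl_cons]
    rw [ih (List.nodup_cons.mp hnd).2]
    by_cases hv : v = x
    · subst hv
      rw [PySem.Dict.getD_insert_self]
      simp [hx]
    · rw [PySem.Dict.getD_insert_of_ne _ _ _ hv]
      by_cases hm : v ∈ cs <;> simp [hm, hv]

lemma pvB_go (L : List (List Int)) :
    ∀ (rest : List (List Int)) (m : Nat) (tree : PySem.Dict Int Int)
      (idx : PySem.Dict Int (List Int)),
      L.drop m = rest →
      (∀ v : Int, idx.getD v []
        = ((List.range m).filter
            (fun j => decide (v ∈ PySem.Set.ofList (L.getD j [])))).map (fun k : Nat => (k : Int))) →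
      (∀ i' : Int, tree.contains i' = true → i' < (m : Int)) →
      (List.foldl bctAltStep (tree, idx) (PySem.List.enumerate rest (m : Int))).1.items
        = tree.items ++ (List.range (L.length - m)).map
            (fun k => (((m + k : Nat) : Int), pvBest L (m + k))) := by
  intro rest
  induction rest with
  | nil =>
    intro m tree idx hdrop hidx htree
    have hle : L.length ≤ m := by
      have := congrArg List.length hdrop
      simp at this
      omega
    simp [PySem.List.enumerate, Nat.sub_eq_zero_of_le hle]
  | cons c rest ih =>
    intro m tree idx hdrop hidx htree
    have hml : m < L.length := by
      by_contra h
      rw [List.drop_eq_nil_of_le (by omega)] at hdrop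
      exact List.cons_ne_nil _ _ hdrop.symm
    have hgetc : L.getD m [] = c := by
      have h0 : (L.drop m)[0]? = some c := by rw [hdrop]; rfl
      rw [List.getElem?_drop] at h0
      simp only [Nat.add_zero] at h0
      simp [List.getD_eq_getElem?_getD, h0]
    have hdrop' : L.drop (m + 1) = rest := by
      have := congrArg (List.drop 1) hdrop
      simpa using this
    have henum : PySem.List.enumerate (c :: rest) (m : Int)
        = ((m : Int), c) :: PySem.List.enumerate rest ((m : Int) + 1) := by
      simp [PySem.List.enumerate]
    rw [henum, List.foldl_cons]
    -- the step on (↑m, c)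
    have hstep : bctAltStep (tree, idx) ((m : Int), c)
        = (tree.insert (m : Int) (pvBest L m),
           List.foldl (fun (d : PySem.Dict Int (List Int)) (v : Int) =>
              d.insert v (d.getD v [] ++ [(m : Int)])) idx (PySem.Set.ofList c)) := by
      unfold bctAltStep
      simp only
      congr 2
      -- the selected parent is pvBest L m
      rw [Int.toNat_natCast, ← List.foldl_flatMap]
      set E := (PySem.Set.ofList c).flatMap (fun v => idx.getD v []) with hE
      have hEmem : ∀ e ∈ E, 0 ≤ e ∧ e < ((List.replicate m (0 : Int)).length : Int) := by
        intro e he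
        rw [hE, List.mem_flatMap] at he
        obtain ⟨v, _, hev⟩ := he
        rw [hidx v, List.mem_map] at hev
        obtain ⟨j, hj, rfl⟩ := hev
        have := List.mem_range.mp (List.mem_filter.mp hj).1
        simp [List.length_replicate]
        omega
      obtain ⟨hlen, hget⟩ := pv_incr E (List.replicate m (0 : Int)) hEmem
      set counts := List.foldl (fun (c : List Int) (e : Int) =>
          PySem.List.pySetD c e (PySem.List.pyGetD c e 0 + 1)) (List.replicate m (0 : Int)) E
        with hcounts
      have hlenc : counts.length = m := by rw [hlen, List.length_replicate]
      have hval : ∀ j : Nat, j < m → counts.getD j 0 = pvOv L m j := by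
        intro j hj
        rw [hget j (by simp [List.length_replicate]; omega)]
        have hcount : E.count ((j : Nat) : Int)
            = (PySem.Set.ofList c).countP
                (fun v => decide (v ∈ PySem.Set.ofList (L.getD j []))) := by
          rw [hE]
          have : (fun v => idx.getD v [])
              = fun v => ((List.range m).filter
                  (fun j => decide (v ∈ PySem.Set.ofList (L.getD j [])))).map
                    (fun k : Nat => (k : Int)) := funext hidx
          rw [this]
          exact pv_count_flatMap _ m j hj (PySem.Set.ofList c)
        rw [hcount]
        unfold pvOv
        rw [hgetc]
        rw [PySem.Set.len, PySem.Set.inter, List.countP_eq_length_filter]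
        have : List.filter (fun x => (PySem.Set.ofList (L.getD j [])).contains x)
              (PySem.Set.ofList c)
            = List.filter (fun v => decide (v ∈ PySem.Set.ofList (L.getD j [])))
              (PySem.Set.ofList c) := by
          refine List.filter_congr ?_
          intro x _
          simp [PySem.Set.contains]
        rw [this]
        simp
      -- scan of the counter array = A's scan
      rw [PySem.List.enumerate_eq_map_pyRange counts 0, PySem.List.len_eq, hlenc,
        PySem.List.pyRange_zero_natCast, List.map_map, List.foldl_map]
      unfold pvBest
      refine congrArg Prod.fst ?_
      refine PySem.List.foldl_congr_mem _ _ _ _ ?_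
      intro acc x hx
      simp only [Function.comp]
      rw [PySem.List.pyGetD_natCast, hval x (List.mem_range.mp hx)]
    rw [hstep]
    -- invariants for the next step
    have hidx' : ∀ v : Int,
        (List.foldl (fun (d : PySem.Dict Int (List Int)) (v : Int) =>
            d.insert v (d.getD v [] ++ [(m : Int)])) idx (PySem.Set.ofList c)).getD v []
          = ((List.range (m + 1)).filter
              (fun j => decide (v ∈ PySem.Set.ofList (L.getD j [])))).map
                (fun k : Nat => (k : Int)) := by
      intro v
      rw [pv_idx_update (PySem.Set.ofList c) (PySem.Set.nodup_ofList c) idx (m : Int) v,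
        hidx v, List.range_succ, List.filter_append, List.map_append]
      congr 1
      have hgetc2 : L[m]?.getD [] = c := by rw [← List.getD_eq_getElem?_getD]; exact hgetc
      by_cases hv : v ∈ c
      · simp [hgetc2, hv]
      · simp [hgetc2, hv]
    have htree' : ∀ i' : Int,
        (tree.insert (m : Int) (pvBest L m)).contains i' = true → i' < ((m + 1 : Nat) : Int) := by
      intro i' h
      rw [PySem.Dict.contains_insert] at h
      rcases Bool.or_eq_true_iff.mp h with h | h
      · have : i' = (m : Int) := by exact_mod_cast eq_of_beq h
        push_cast
        omega
      · have := htree i' h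
        push_cast
        omega
    have hcast : (m : Int) + 1 = ((m + 1 : Nat) : Int) := by push_cast; ring
    rw [hcast, ih (m + 1) _ _ hdrop' hidx' htree']
    have hnc : tree.contains (m : Int) = false := by
      cases h : tree.contains (m : Int)
      · rfl
      · exact absurd (htree _ h) (by omega)
    rw [PySem.Dict.items_insert_of_not_contains _ _ hnc]
    have hsub : L.length - m = (L.length - (m + 1)) + 1 := by omega
    rw [hsub, List.range_succ_eq_map, List.map_cons, List.map_map, List.append_assoc]
    simp only [Nat.add_zero, List.cons_append, List.nil_append]
    congr 2
    refine List.map_congr_left ?_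
    intro k _
    have : m + 1 + k = m + (k + 1) := by omega
    simp [Function.comp, this]

lemma pvB_items (L : List (List Int)) :
    build_clique_tree_alt L = (List.range L.length).map (fun (i : Nat) => ((i : Int), pvBest L i)) := by
  unfold build_clique_tree_alt
  have h := pvB_go L L 0 PySem.Dict.empty PySem.Dict.empty rfl
    (by intro v; simp) (by intro i' h; simp at h)
  simp only [Nat.cast_zero, Nat.zero_add, Nat.sub_zero] at h
  rw [h]
  simp [PySem.Dict.empty]

-- ===== VERDICT (by name: the statement is the Claim_ definition above) =====
theorem build_clique_tree_spec : Claim_equal_build_clique_tree := by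
  intro cliques _
  unfold Spec_build_clique_tree
  rw [pvA_items, pvB_items]
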